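-- pv_equiv track=rewrite | github.com/alxmamaev/doglang | source/main.py | line_format
-- ===== SOURCE A (Python) =====
-- def line_format(line):
--     line = line.strip()
--     comment_chr = ";"
--     special_chrs = ["\n","\t","\v"]
--     frmt_line = ""
--     space = False
--     for ch in line:
--         if ch == comment_chr: break
--         elif space and ch == " ":
--             frmt_line += " "
--             space = False
--         elif ch not in special_chrs:
--             frmt_line += ch
--             space = True
--     return frmt_line.split() if frmt_line else None
-- ===== SOURCE B (Python) =====
-- def line_format(line):
--     code = line.strip()
--     cut = code.find(";")
--     if cut != -1:
--         code = code[:cut]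
--     for c in "\n\t\v":
--         code = code.replace(c, "")
--     return code.split() if code else None
-- ===== Notes on version B (the rewrite author's own statement) =====
-- stated objective: simpler
-- what changed: Replaces A's character-by-character accumulation loop (with its redundant space flag) by a string-method pipeline: truncate at the first semicolon via find/slicing, delete the newline/tab/vertical-tab characters via replace, then split.
import Mathlib
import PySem

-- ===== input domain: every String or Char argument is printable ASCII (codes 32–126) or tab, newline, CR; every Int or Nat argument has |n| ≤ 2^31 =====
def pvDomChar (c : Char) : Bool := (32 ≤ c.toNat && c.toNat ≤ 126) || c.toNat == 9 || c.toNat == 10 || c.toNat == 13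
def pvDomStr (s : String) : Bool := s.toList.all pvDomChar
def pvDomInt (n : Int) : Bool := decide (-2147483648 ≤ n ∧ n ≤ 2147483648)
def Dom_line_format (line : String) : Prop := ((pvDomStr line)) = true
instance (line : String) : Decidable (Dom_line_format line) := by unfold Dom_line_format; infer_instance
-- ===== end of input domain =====

-- B replaces A's char-by-char flag loop by a string-method pipeline (truncate at the
-- first ';' via find/slice, delete '\n' '\t' '\x0B' via replace, then split); objective: simpler.

-- ===== PORT A =====
-- the accumulation loop of A: state = (space flag, frmt_line); 'break' at ';' returns the accumulator
def lineFormatGo : List Char → Bool → List Char → List Char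
  | [], _, acc => acc
  | c :: t, space, acc =>
    if c = ';' then acc
    else if space = true ∧ c = ' ' then lineFormatGo t false (acc ++ [' '])
    else if ¬ (c = '\n' ∨ c = '\t' ∨ c = '\x0B') then lineFormatGo t true (acc ++ [c])
    else lineFormatGo t space acc

def line_format (line : String) : Option (List String) :=
  let frmt := lineFormatGo (PySem.Chars.strip line.toList) false []
  if frmt.isEmpty then none
  else some ((PySem.Chars.split₀ frmt).map String.ofList)

-- ===== PORT B =====
def line_format_alt (line : String) : Option (List String) :=
  let code0 := PySem.Chars.strip line.toList
  let cut := PySem.Chars.find code0 [';']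
  let code1 := if cut ≠ -1 then PySem.Chars.slice code0 none (some cut) else code0
  let code2 := PySem.Chars.replace (PySem.Chars.replace (PySem.Chars.replace code1 ['\n'] []) ['\t'] []) ['\x0B'] []
  if code2.isEmpty then none
  else some ((PySem.Chars.split₀ code2).map String.ofList)

-- ===== PRECONDITION & SPEC =====
def Spec_line_format (line : String) (out : Option (List String)) : Prop := out = line_format_alt line
instance (line : String) (out : Option (List String)) : Decidable (Spec_line_format line out) := by unfold Spec_line_format; infer_instance

-- ===== CLAIM (what is proved, stated in full; the proofs are below) =====
def Claim_equal_line_format : Prop := ∀ (line : String), Dom_line_format line → Spec_line_format line (line_format line)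

-- ===== LEMMAS AND PROOFS =====
theorem go_replace (c : Char) : ∀ (fuel : Nat) (l acc : List Char), l.length ≤ fuel →
    PySem.Chars.replace.go [c] [] fuel l acc = acc.reverse ++ l.filter (· != c) := by
  intro fuel
  induction fuel with
  | zero =>
    intro l acc h
    have : l = [] := List.eq_nil_of_length_eq_zero (by omega)
    subst this; simp [PySem.Chars.replace.go]
  | succ n ih =>
    intro l acc h
    cases l with
    | nil => simp [PySem.Chars.replace.go]
    | cons x t =>
      simp only [PySem.Chars.replace.go]
      by_cases hx : x = c
      · subst hx
        rw [if_pos (by simp [List.isPrefixOf])]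
        simp only [List.length_cons] at h
        simp only [List.length_singleton, List.drop_succ_cons, List.drop_zero, List.reverse_nil,
          List.nil_append]
        rw [ih t acc (by omega)]
        simp
      · rw [if_neg (by simp [List.isPrefixOf, Ne.symm hx])]
        simp only [List.length_cons] at h
        rw [ih t (x :: acc) (by omega)]
        simp [hx]

theorem replace_single (c : Char) (l : List Char) :
    PySem.Chars.replace l [c] [] = l.filter (· != c) := by
  simp [PySem.Chars.replace, go_replace c l.length l [] le_rfl]

theorem take_eq_takeWhile (p : Char → Bool) : ∀ (l : List Char) (n : Nat) (hn : n < l.length),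
    (∀ i (hi : i < n), p (l.get ⟨i, lt_trans hi hn⟩)) → p (l.get ⟨n, hn⟩) = false →
    l.take n = l.takeWhile p := by
  intro l
  induction l with
  | nil => intro n h; simp at h
  | cons x t ih =>
    intro n hn hall hstop
    cases n with
    | zero => simp at hstop; simp [List.takeWhile, hstop]
    | succ m =>
      have hx : p x = true := hall 0 (by omega)
      simp only [List.take_succ_cons, List.takeWhile_cons, hx, if_true]
      exact congrArg (x :: ·) (ih m (by simpa using hn) (fun i hi => hall (i+1) (by omega)) hstop)

theorem singleton_prefix_drop {a : Char} {l : List Char} {i : Nat} (hi : i < l.length)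
    (he : l.get ⟨i, hi⟩ = a) : [a] <+: l.drop i := by
  refine ⟨(l.drop i).tail, ?_⟩
  have : (l.drop i).head? = some a := by
    rw [List.head?_drop]
    simp [List.getElem?_eq_getElem hi, ← he]
  cases hd : l.drop i with
  | nil => simp [hd] at this
  | cons y r => simp [hd] at this ⊢; exact this.symm

theorem cut_eq_takeWhile (l : List Char) :
    (if PySem.Chars.find l [';'] ≠ -1 then PySem.Chars.slice l none (some (PySem.Chars.find l [';'])) else l)
      = l.takeWhile (· != ';') := by
  by_cases h : PySem.Chars.find l [';'] = -1
  · rw [if_neg (by simp [h])]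
    rw [PySem.Chars.find_eq_neg_one_iff] at h
    refine (List.takeWhile_eq_self_iff.mpr ?_).symm
    intro a ha
    simp only [bne_iff_ne, ne_eq]
    rintro rfl
    exact h ((List.singleton_infix_iff _ l).mpr ha)
  · rw [if_pos h]
    have hge : 0 ≤ PySem.Chars.find l [';'] := by
      have := PySem.Chars.neg_one_le_find l [';']
      omega
    obtain ⟨hpre, hmin⟩ := PySem.Chars.find_spec hge
    set n := (PySem.Chars.find l [';']).toNat with hn
    have hlen : n < l.length := by
      rcases hpre with ⟨r, hr⟩
      have := congrArg List.length hr
      simp at this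
      omega
    have hat : l.get ⟨n, hlen⟩ = ';' := by
      rcases hpre with ⟨r, hr⟩
      have h2 : (l.drop n).head? = some ';' := by rw [← hr]; rfl
      rw [List.head?_drop] at h2
      simp [List.getElem?_eq_getElem hlen] at h2
      simpa using h2
    rw [PySem.Chars.slice_eq_listSlice, PySem.List.slice_to _ hge]
    exact take_eq_takeWhile (· != ';') l n hlen
      (fun i hi => by
        have hne : l.get ⟨i, lt_trans hi hlen⟩ ≠ ';' := by
          intro he
          exact hmin i hi (singleton_prefix_drop _ he)
        simpa using hne)
      (by simp only [bne_eq_false_iff_eq]; simpa using hat)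

-- the special-character filter A's loop applies
def nspec (c : Char) : Bool := !(c == '\n' || c == '\t' || c == '\x0B')

theorem lineFormatGo_eq (cs : List Char) : ∀ (space : Bool) (acc : List Char),
    lineFormatGo cs space acc = acc ++ (cs.takeWhile (· != ';')).filter nspec := by
  induction cs with
  | nil => intro space acc; simp [lineFormatGo]
  | cons c t ih =>
    intro space acc
    by_cases hc : c = ';'
    · subst hc; simp [lineFormatGo]
    · by_cases hsp : space = true ∧ c = ' '
      · obtain ⟨h1, h2⟩ := hsp; subst h1 h2
        rw [lineFormatGo, if_neg hc, if_pos ⟨rfl, rfl⟩, ih]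
        rw [List.takeWhile_cons, if_pos (by decide), List.filter_cons_of_pos (by decide)]
        simp
      · by_cases hns : ¬ (c = '\n' ∨ c = '\t' ∨ c = '\x0B')
        · rw [lineFormatGo, if_neg hc, if_neg hsp, if_pos hns, ih]
          have : nspec c = true := by simp [nspec]; tauto
          simp [hc, this]
        · rw [lineFormatGo, if_neg hc, if_neg hsp, if_neg hns, ih]
          have : nspec c = false := by simp [nspec] at hns ⊢; tauto
          simp [hc, this]

theorem filter_chain (l : List Char) :
    ((l.filter (· != '\n')).filter (· != '\t')).filter (· != '\x0B') = l.filter nspec := by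
  simp only [List.filter_filter]
  refine List.filter_congr ?_
  intro c _
  simp only [nspec]
  cases hn : c == '\n' <;> cases ht : c == '\t' <;> cases hv : c == '\x0B' <;>
    simp_all [bne]

-- ===== VERDICT (by name: the statement is the Claim_ definition above) =====
theorem line_format_spec : Claim_equal_line_format := by
  intro line _
  unfold Spec_line_format line_format line_format_alt
  simp only []
  rw [replace_single, replace_single, replace_single, filter_chain, cut_eq_takeWhile,
    lineFormatGo_eq]
  simp
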